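-- pv_equiv track=rewrite | github.com/FrankSpooren/HolidaiButler | original-source/04-Development/backend/transform-opening-hours.py | parse_hourly_to_ranges
-- ===== SOURCE A (Python) =====
-- DAY_MAP = {
--     'Mo': 'monday',
--     'Tu': 'tuesday',
--     'We': 'wednesday',
--     'Th': 'thursday',
--     'Fr': 'friday',
--     'Sa': 'saturday',
--     'Su': 'sunday'
-- }
--
-- def parse_hourly_to_ranges(hourly_string):
--     """
--     Convert hourly open/closed status to time ranges
--     Input: "Mo:0:open;Mo:1:open;Mo:2:closed;..."
--     Output: {"monday": [{"open": "00:00", "close": "02:00"}], ...}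
--     """
--     if not hourly_string or hourly_string == 'NULL':
--         return None
--
--     # Parse hourly data into dict
--     hours_by_day = {day: [False] * 24 for day in DAY_MAP.keys()}
--
--     for entry in hourly_string.split(';'):
--         parts = entry.split(':')
--         if len(parts) != 3:
--             continue
--
--         day_abbr, hour_str, status = parts
--         if day_abbr not in hours_by_day:
--             continue
--
--         try:
--             hour = int(hour_str)
--             if 0 <= hour < 24:
--                 hours_by_day[day_abbr][hour] = (status == 'open')
--         except ValueError:
--             continue
--
--     # Convert to ranges
--     result = {}
--     for day_abbr, day_full in DAY_MAP.items():
--         hours = hours_by_day[day_abbr]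
--         ranges = []
--
--         # Find contiguous open periods
--         start = None
--         for hour in range(24):
--             if hours[hour] and start is None:
--                 # Start of open period
--                 start = hour
--             elif not hours[hour] and start is not None:
--                 # End of open period
--                 ranges.append({
--                     "open": f"{start:02d}:00",
--                     "close": f"{hour:02d}:00"
--                 })
--                 start = None
--
--         # Handle open period that extends to end of day
--         if start is not None:
--             ranges.append({
--                 "open": f"{start:02d}:00",
--                 "close": "23:59"
--             })
--
--         # Store ranges if not empty
--         if ranges:
--             result[day_full] = ranges
--         else:
--             # Explicitly mark closed days
--             result[day_full] = []
--
--     return result if result else None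
-- ===== SOURCE B (Python) =====
-- DAY_MAP = {
--     'Mo': 'monday',
--     'Tu': 'tuesday',
--     'We': 'wednesday',
--     'Th': 'thursday',
--     'Fr': 'friday',
--     'Sa': 'saturday',
--     'Su': 'sunday'
-- }
--
-- def parse_hourly_to_ranges(hourly_string):
--     """
--     Convert hourly open/closed status to time ranges, via sets of open hours:
--     a range starts at an open hour whose predecessor is closed and ends after
--     an open hour whose successor is closed; zipping the sorted boundary lists
--     yields the ranges without any stateful scan.
--     """
--     if not hourly_string or hourly_string == 'NULL':
--         return None
--
--     open_hours = {day: set() for day in DAY_MAP}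
--
--     for entry in hourly_string.split(';'):
--         parts = entry.split(':')
--         if len(parts) != 3:
--             continue
--         day_abbr, hour_str, status = parts
--         if day_abbr not in open_hours:
--             continue
--         try:
--             hour = int(hour_str)
--         except ValueError:
--             continue
--         if 0 <= hour < 24:
--             if status == 'open':
--                 open_hours[day_abbr].add(hour)
--             else:
--                 open_hours[day_abbr].discard(hour)
--
--     result = {}
--     for day_abbr, day_full in DAY_MAP.items():
--         s = open_hours[day_abbr]
--         starts = sorted(h for h in s if h - 1 not in s)
--         ends = sorted(h + 1 for h in s if h + 1 not in s)
--         result[day_full] = [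
--             {"open": f"{a:02d}:00",
--              "close": "23:59" if b == 24 else f"{b:02d}:00"}
--             for a, b in zip(starts, ends)
--         ]
--     return result
-- ===== Notes on version B (the rewrite author's own statement) =====
-- stated objective: alternative
-- what changed: Replaces the per-day 24-slot boolean array and the stateful start=None scan by per-day sets of open hours whose ranges are read off statelessly: zip the sorted list of run starts (open hour with closed predecessor) with the sorted list of run ends (open hour with closed successor, plus one).
import Mathlib
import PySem

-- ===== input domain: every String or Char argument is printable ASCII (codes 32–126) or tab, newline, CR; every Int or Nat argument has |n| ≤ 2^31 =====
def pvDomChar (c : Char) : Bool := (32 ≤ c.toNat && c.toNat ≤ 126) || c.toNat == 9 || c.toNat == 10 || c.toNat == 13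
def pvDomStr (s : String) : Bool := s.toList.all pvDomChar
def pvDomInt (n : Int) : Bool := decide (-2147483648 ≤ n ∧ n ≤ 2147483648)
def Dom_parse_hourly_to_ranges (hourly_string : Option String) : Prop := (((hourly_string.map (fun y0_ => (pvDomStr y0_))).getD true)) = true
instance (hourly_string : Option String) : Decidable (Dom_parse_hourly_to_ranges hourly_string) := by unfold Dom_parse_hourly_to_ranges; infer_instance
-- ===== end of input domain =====

-- B replaces A's per-day 24-slot boolean array and stateful start=None scan by per-day
-- sets of open hours whose ranges are read off statelessly (zip of sorted run-boundary
-- lists); alternative decomposition, same cost, same return value on every input.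

-- DAY_MAP as its (key, value) item list (shared constant of both Pythons)
def pvDays : List (List Char × String) :=
  [(['M','o'], "monday"), (['T','u'], "tuesday"), (['W','e'], "wednesday"),
   (['T','h'], "thursday"), (['F','r'], "friday"), (['S','a'], "saturday"),
   (['S','u'], "sunday")]

-- f"{n:02d}:00" — exact for the only values reached, 0 ≤ n < 100
def pvFmt2 (n : Int) : String :=
  String.mk ((if n < 10 then ['0'] else []) ++ PySem.Int.toChars n ++ [':', '0', '0'])

-- ===== PORT A =====

-- {day: [False] * 24 for day in DAY_MAP.keys()}
def pvInitA : PySem.Dict (List Char) (List Bool) :=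
  pvDays.foldl (fun d p => d.insert p.1 (List.replicate 24 false)) PySem.Dict.empty

-- body of A's parsing loop, one entry
def pvStepA (d : PySem.Dict (List Char) (List Bool)) (entry : List Char) :
    PySem.Dict (List Char) (List Bool) :=
  match PySem.Chars.splitOn entry [':'] with
  | [day_abbr, hour_str, status] =>
    if d.contains day_abbr then
      match PySem.Int.ofChars? hour_str with
      | some hour =>
        if 0 ≤ hour ∧ hour < 24 then
          -- hours_by_day[day_abbr][hour] = (status == 'open'); 0 ≤ hour so .toNat is exact
          d.modify day_abbr [] (fun l => l.set hour.toNat (status == ['o','p','e','n']))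
        else d
      | none => d
    else d
  | _ => d

-- A's per-day range extraction: the stateful start=None scan over range(24)
def pvRangesA (hours : List Bool) : List (List (String × String)) :=
  let scan := (PySem.List.pyRange 0 24).foldl
    (fun (st : List (List (String × String)) × Option Int) hour =>
      if PySem.List.pyGetD hours hour false && st.2.isNone then
        (st.1, some hour)
      else if !(PySem.List.pyGetD hours hour false) && st.2.isSome then
        (st.1 ++ [[("open", pvFmt2 (st.2.getD 0)), ("close", pvFmt2 hour)]], none)
      else st) ([], none)
  match scan.2 with
  | some a => scan.1 ++ [[("open", pvFmt2 a), ("close", "23:59")]]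
  | none => scan.1

def parse_hourly_to_ranges (hourly_string : Option String) :
    Option (List (String × List (List (String × String)))) :=
  match hourly_string with
  | none => none
  | some s =>
    if s = "" ∨ s = "NULL" then none
    else
      let hours_by_day := (PySem.Chars.splitOn s.toList [';']).foldl pvStepA pvInitA
      let result : PySem.Dict String (List (List (String × String))) :=
        pvDays.foldl (fun r dp =>
          -- hours_by_day[day_abbr]: key always present (DAY_MAP key)
          r.insert dp.2 (pvRangesA (hours_by_day.getD dp.1 []))) PySem.Dict.empty
      -- return result if result else None
      if result.items = [] then none else some result.items

-- ===== PORT B =====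

-- {day: set() for day in DAY_MAP}
def pvInitB : PySem.Dict (List Char) (PySem.Set Int) :=
  pvDays.foldl (fun d p => d.insert p.1 PySem.Set.empty) PySem.Dict.empty

-- body of B's parsing loop, one entry
def pvStepB (d : PySem.Dict (List Char) (PySem.Set Int)) (entry : List Char) :
    PySem.Dict (List Char) (PySem.Set Int) :=
  match PySem.Chars.splitOn entry [':'] with
  | [day_abbr, hour_str, status] =>
    if d.contains day_abbr then
      match PySem.Int.ofChars? hour_str with
      | some hour =>
        if 0 ≤ hour ∧ hour < 24 then
          if status == ['o','p','e','n'] then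
            d.modify day_abbr [] (fun t => PySem.Set.add t hour)
          else
            d.modify day_abbr [] (fun t => PySem.Set.discard t hour)
        else d
      | none => d
    else d
  | _ => d

-- B's per-day range extraction: zip of the sorted run-boundary lists
def pvRangesB (t : PySem.Set Int) : List (List (String × String)) :=
  let starts := PySem.List.sorted (t.filter (fun h => !(PySem.Set.contains t (h - 1)))) (fun x => x)
  let ends := PySem.List.sorted ((t.filter (fun h => !(PySem.Set.contains t (h + 1)))).map (fun h => h + 1)) (fun x => x)
  (starts.zip ends).map (fun q =>
    [("open", pvFmt2 q.1), ("close", if q.2 = 24 then "23:59" else pvFmt2 q.2)])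

def parse_hourly_to_ranges_alt (hourly_string : Option String) :
    Option (List (String × List (List (String × String)))) :=
  match hourly_string with
  | none => none
  | some s =>
    if s = "" ∨ s = "NULL" then none
    else
      let open_hours := (PySem.Chars.splitOn s.toList [';']).foldl pvStepB pvInitB
      let result : PySem.Dict String (List (List (String × String))) :=
        pvDays.foldl (fun r dp =>
          r.insert dp.2 (pvRangesB (open_hours.getD dp.1 []))) PySem.Dict.empty
      some result.items

-- ===== PRECONDITION & SPEC =====
def Spec_parse_hourly_to_ranges (hourly_string : Option String) (out : Option (List (String × List (List (String × String))))) : Prop := out = parse_hourly_to_ranges_alt hourly_string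
instance (hourly_string : Option String) (out : Option (List (String × List (List (String × String))))) : Decidable (Spec_parse_hourly_to_ranges hourly_string out) := by unfold Spec_parse_hourly_to_ranges; infer_instance

-- ===== CLAIM (what is proved, stated in full; the proofs are below) =====
def Claim_equal_parse_hourly_to_ranges : Prop := ∀ (hourly_string : Option String), Dom_parse_hourly_to_ranges hourly_string → Spec_parse_hourly_to_ranges hourly_string (parse_hourly_to_ranges hourly_string)

-- ===== LEMMAS AND PROOFS =====

-- abstract (unformatted) version of A's scan
def pvStepAbs (p : Int → Bool) (st : List (Int × Int) × Option Int) (hour : Int) :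
    List (Int × Int) × Option Int :=
  if p hour && st.2.isNone then (st.1, some hour)
  else if !(p hour) && st.2.isSome then (st.1 ++ [(st.2.getD 0, hour)], none)
  else st

def pvScanAbs (p : Int → Bool) (n : Nat) : List (Int × Int) × Option Int :=
  (PySem.List.pyRange 0 (n : Int)).foldl (pvStepAbs p) ([], none)

def pvFinAbs (p : Int → Bool) (n : Nat) : List (Int × Int) :=
  (pvScanAbs p n).1 ++ (match (pvScanAbs p n).2 with | some a => [(a, (n : Int))] | none => [])

def pvFmtPair (q : Int × Int) : List (String × String) :=
  [("open", pvFmt2 q.1), ("close", pvFmt2 q.2)]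

def pvFmtPairB (q : Int × Int) : List (String × String) :=
  [("open", pvFmt2 q.1), ("close", if q.2 = 24 then "23:59" else pvFmt2 q.2)]

-- relation between A's dict of 24-slot boolean lists and B's dict of open-hour sets
def pvRelD (dA : PySem.Dict (List Char) (List Bool)) (dB : PySem.Dict (List Char) (PySem.Set Int)) : Prop :=
  (∀ k, dA.contains k = dB.contains k) ∧
  (∀ pr ∈ pvDays, dA.contains pr.1 = true) ∧
  (∀ k, (dB.getD k []).Nodup) ∧
  (∀ k, ∀ h ∈ dB.getD k [], 0 ≤ h ∧ h < 24) ∧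
  (∀ k, dA.contains k = true → (dA.getD k []).length = 24) ∧
  (∀ k, ∀ h : Int, 0 ≤ h → h < 24 →
    PySem.List.pyGetD (dA.getD k []) h false = PySem.Set.contains (dB.getD k []) h)

lemma pv_pyGetD_replicate (n : Nat) (i : Int) :
    PySem.List.pyGetD (List.replicate n false) i false = false := by
  cases h : PySem.List.pyIdx? n i <;>
    simp [PySem.List.pyGetD, PySem.List.pyGet?, h, List.getElem?_replicate]
  split <;> rfl

lemma pv_contains_keys {ν : Type} (d : PySem.Dict (List Char) ν) (k : List Char) :
    d.contains k = (d.items.map Prod.fst).any (· == k) := by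
  rw [List.any_map]; rfl

lemma pv_initA_items : pvInitA.items =
    pvDays.map (fun p => (p.1, List.replicate 24 false)) := by decide

lemma pv_initB_items : pvInitB.items =
    pvDays.map (fun p => (p.1, ([] : PySem.Set Int))) := by decide

lemma pv_getD_initB (k : List Char) : pvInitB.getD k [] = [] := by
  unfold PySem.Dict.getD PySem.Dict.get?
  rcases hf : List.find? (fun p => p.1 == k) pvInitB.items with _ | r
  · simp [hf]
  · have hm := List.mem_of_find?_eq_some hf
    rw [pv_initB_items] at hm
    have : r.2 = [] := by fin_cases hm <;> rfl
    simp [hf, this]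

lemma pv_getD_initA (k : List Char) :
    pvInitA.getD k [] = [] ∨ pvInitA.getD k [] = List.replicate 24 false := by
  unfold PySem.Dict.getD PySem.Dict.get?
  rcases hf : List.find? (fun p => p.1 == k) pvInitA.items with _ | r
  · left; simp [hf]
  · have hm := List.mem_of_find?_eq_some hf
    rw [pv_initA_items] at hm
    have : r.2 = List.replicate 24 false := by fin_cases hm <;> rfl
    right; simp [hf, this]

lemma pvRelD_init : pvRelD pvInitA pvInitB := by
  refine ⟨?_, by decide, ?_, ?_, ?_, ?_⟩
  · intro k
    rw [pv_contains_keys, pv_contains_keys, pv_initA_items, pv_initB_items,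
        List.any_map, List.any_map]
    rfl
  · intro k; rw [pv_getD_initB]; exact List.nodup_nil
  · intro k h hh; rw [pv_getD_initB] at hh; simp at hh
  · intro k hc
    unfold PySem.Dict.getD PySem.Dict.get?
    rcases hf : List.find? (fun p => p.1 == k) pvInitA.items with _ | r
    · rw [List.find?_eq_none] at hf
      rw [PySem.Dict.contains, List.any_eq_true] at hc
      obtain ⟨x, hx, hpx⟩ := hc
      exact absurd hpx (hf x hx)
    · have hm := List.mem_of_find?_eq_some hf
      rw [pv_initA_items] at hm
      have : r.2 = List.replicate 24 false := by fin_cases hm <;> rfl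
      simp [hf, this]
  · intro k h h0 h24
    rw [pv_getD_initB]
    rcases pv_getD_initA k with hA | hA <;> rw [hA]
    · simp [PySem.List.pyGetD, PySem.List.pyGet?, PySem.List.pyIdx?, PySem.Set.contains]
    · rw [pv_pyGetD_replicate]; rfl

lemma pvRelD_update (dA : PySem.Dict (List Char) (List Bool)) (dB : PySem.Dict (List Char) (PySem.Set Int))
    (day : List Char) (hour : Int) (b : Bool) (h : pvRelD dA dB)
    (h0 : 0 ≤ hour) (h24 : hour < 24) (hc : dA.contains day = true) :
    pvRelD (dA.modify day [] (fun l => l.set hour.toNat b))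
      (dB.modify day [] (fun t => if b then PySem.Set.add t hour else PySem.Set.discard t hour)) := by
  obtain ⟨h1, h2, h3, h4, h5, h6⟩ := h
  refine ⟨?_, ?_, ?_, ?_, ?_, ?_⟩
  · intro k
    rw [PySem.Dict.contains_modify, PySem.Dict.contains_modify, h1]
  · intro pr hpr
    rw [PySem.Dict.contains_modify, h2 pr hpr, Bool.or_true]
  · intro k
    rw [PySem.Dict.getD_modify]
    by_cases hk : k = day
    · rw [if_pos hk]
      cases b with
      | false => simpa using PySem.Set.nodup_discard _ hour (h3 day)
      | true => simpa using PySem.Set.nodup_add _ hour (h3 day)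
    · rw [if_neg hk]; exact h3 k
  · intro k hh hmem
    rw [PySem.Dict.getD_modify] at hmem
    by_cases hk : k = day
    · rw [if_pos hk] at hmem
      cases b with
      | false =>
        simp only [Bool.false_eq_true, if_false] at hmem
        exact h4 day hh (PySem.Set.mem_discard _ _ _ |>.mp hmem).1
      | true =>
        simp only [if_true] at hmem
        rcases (PySem.Set.mem_add _ _ _).mp hmem with hm | hm
        · exact h4 day hh hm
        · exact hm ▸ ⟨h0, h24⟩
    · rw [if_neg hk] at hmem; exact h4 k hh hmem
  · intro k hck
    rw [PySem.Dict.contains_modify] at hck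
    rw [PySem.Dict.getD_modify]
    by_cases hk : k = day
    · rw [if_pos hk, List.length_set]; exact h5 day hc
    · rw [if_neg hk]
      have : (k == day) = false := by simpa using hk
      rw [this, Bool.false_or] at hck
      exact h5 k hck
  · intro k hh hh0 hh24
    rw [PySem.Dict.getD_modify, PySem.Dict.getD_modify]
    by_cases hk : k = day
    · rw [if_pos hk, if_pos hk]
      have hlen : (dA.getD day []).length = 24 := h5 day hc
      have hlt : hh < ((dA.getD day []).set hour.toNat b).length := by
        rw [List.length_set, hlen]; exact_mod_cast hh24
      rw [PySem.List.pyGetD_eq_getElem _ _ hh0 hlt, List.getElem_set]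
      by_cases heq : hour = hh
      · have : hour.toNat = hh.toNat := by rw [heq]
        rw [if_pos this, Bool.eq_iff_iff]
        cases b <;>
          simp [PySem.Set.mem_add, PySem.Set.mem_discard, heq]
      · have hne : hour.toNat ≠ hh.toNat := by omega
        rw [if_neg hne]
        have : (dA.getD day [])[hh.toNat] = PySem.List.pyGetD (dA.getD day []) hh false := by
          rw [PySem.List.pyGetD_eq_getElem _ _ hh0 (by rw [hlen]; exact_mod_cast hh24)]
        rw [this, h6 day hh hh0 hh24, Bool.eq_iff_iff]
        have hne' : hh ≠ hour := fun hcon => heq hcon.symm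
        cases b <;>
          simp [PySem.Set.mem_add, PySem.Set.mem_discard, hne']
    · rw [if_neg hk, if_neg hk]; exact h6 k hh hh0 hh24

lemma pvRelD_step (dA : PySem.Dict (List Char) (List Bool)) (dB : PySem.Dict (List Char) (PySem.Set Int))
    (e : List Char) (h : pvRelD dA dB) : pvRelD (pvStepA dA e) (pvStepB dB e) := by
  unfold pvStepA pvStepB
  rcases hsp : PySem.Chars.splitOn e [':'] with _ | ⟨d1, _ | ⟨s1, _ | ⟨st1, _ | ⟨x, rest⟩⟩⟩⟩ <;>
    simp only []
  · exact h
  · exact h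
  · exact h
  · by_cases hcd : dB.contains d1 = true
    · have hcdA : dA.contains d1 = true := by rw [h.1]; exact hcd
      rw [if_pos hcdA, if_pos hcd]
      rcases hio : PySem.Int.ofChars? s1 with _ | hour
      · exact h
      · dsimp only
        by_cases hb : 0 ≤ hour ∧ hour < 24
        · rw [if_pos hb, if_pos hb]
          cases hst : (st1 == ['o','p','e','n'])
          · simpa using pvRelD_update dA dB d1 hour false h hb.1 hb.2 hcdA
          · simpa using pvRelD_update dA dB d1 hour true h hb.1 hb.2 hcdA
        · rw [if_neg hb, if_neg hb]; exact h
    · have hcdA : ¬ dA.contains d1 = true := by rw [h.1]; exact hcd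
      rw [if_neg hcdA, if_neg hcd]; exact h
  · exact h

lemma pvRelD_fold (l : List (List Char)) (dA : PySem.Dict (List Char) (List Bool))
    (dB : PySem.Dict (List Char) (PySem.Set Int)) (h : pvRelD dA dB) :
    pvRelD (l.foldl pvStepA dA) (l.foldl pvStepB dB) := by
  induction l generalizing dA dB with
  | nil => exact h
  | cons e l ih => exact ih _ _ (pvRelD_step dA dB e h)

lemma pv_scanAbs_succ (p : Int → Bool) (n : Nat) :
    pvScanAbs p (n+1) = pvStepAbs p (pvScanAbs p n) (n : Int) := by
  have hc : ((n+1 : Nat) : Int) = (n:Int)+1 := by push_cast; ring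
  rw [pvScanAbs, hc, PySem.List.pyRange_one_succ_right (by positivity), List.foldl_append]
  rfl

lemma pv_scanA_eq (p : Int → Bool) (n : Nat) :
    (PySem.List.pyRange 0 (n : Int)).foldl
      (fun (st : List (List (String × String)) × Option Int) hour =>
        if p hour && st.2.isNone then
          (st.1, some hour)
        else if !(p hour) && st.2.isSome then
          (st.1 ++ [[("open", pvFmt2 (st.2.getD 0)), ("close", pvFmt2 hour)]], none)
        else st) ([], none)
    = ((pvScanAbs p n).1.map pvFmtPair, (pvScanAbs p n).2) := by
  induction n with
  | zero =>
    have h0 : PySem.List.pyRange 0 ((0:Nat):Int) = [] := by decide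
    simp only [pvScanAbs, h0, List.foldl_nil, List.map_nil]
  | succ n ih =>
    have hc : ((n+1 : Nat) : Int) = (n:Int)+1 := by push_cast; ring
    have hr : PySem.List.pyRange 0 ((n+1 : Nat) : Int)
        = PySem.List.pyRange 0 (n : Int) ++ [(n : Int)] := by
      rw [hc]; exact PySem.List.pyRange_one_succ_right (by positivity)
    have hs : pvScanAbs p (n+1) = pvStepAbs p (pvScanAbs p n) (n : Int) := by
      rw [pvScanAbs, hr, List.foldl_append]; rfl
    rw [hr, List.foldl_append, ih, hs]
    rcases h2 : (pvScanAbs p n).2 with _ | a <;> cases hpn : p (n : Int) <;>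
      simp [pvStepAbs, pvFmtPair, h2, hpn]

lemma pv_inv (p : Int → Bool) (hneg : ∀ h : Int, h < 0 → p h = false) (n : Nat) :
    (∀ q ∈ pvFinAbs p n, 0 ≤ q.1 ∧ q.1 < q.2 ∧ q.2 ≤ (n : Int)) ∧
    (∀ q ∈ (pvScanAbs p n).1, q.2 < (n : Int) ∧ p q.2 = false) ∧
    List.Pairwise (fun x y : Int × Int => x.2 < y.1) (pvFinAbs p n) ∧
    (match (pvScanAbs p n).2 with
      | none => n = 0 ∨ p ((n : Int) - 1) = false
      | some a => p ((n : Int) - 1) = true ∧ p a = true ∧ p (a - 1) = false ∧ 0 ≤ a ∧ a < (n : Int)) ∧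
    (∀ a : Int, a ∈ (pvFinAbs p n).map Prod.fst ↔ (p a = true ∧ p (a - 1) = false ∧ a < (n : Int))) ∧
    (∀ b : Int, b ∈ (pvFinAbs p n).map Prod.snd ↔ (p (b - 1) = true ∧ (p b = false ∨ b = (n : Int)) ∧ b ≤ (n : Int))) := by
  induction n with
  | zero =>
    have h0 : pvScanAbs p 0 = ([], none) := by
      unfold pvScanAbs
      norm_num [show PySem.List.pyRange 0 ((0:Nat):Int) = [] from by decide]
    have hf : pvFinAbs p 0 = [] := by unfold pvFinAbs; rw [h0]; rfl
    refine ⟨by simp [hf], by simp [h0], by simp [hf], by rw [h0]; exact Or.inl rfl, ?_, ?_⟩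
    · intro a
      simp only [hf, List.map_nil, List.not_mem_nil, false_iff, Nat.cast_zero]
      rintro ⟨hpa, -, ha⟩
      rw [hneg a ha] at hpa; exact Bool.false_ne_true hpa
    · intro b
      simp only [hf, List.map_nil, List.not_mem_nil, false_iff, Nat.cast_zero]
      rintro ⟨hpb, -, hb⟩
      have : (b : Int) - 1 < 0 := by omega
      rw [hneg _ this] at hpb; exact Bool.false_ne_true hpb
  | succ n ih =>
    obtain ⟨A1, A2, A3, A4, A5, A6⟩ := ih
    have hc : ((n+1 : Nat) : Int) = (n:Int)+1 := by push_cast; ring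
    rcases hst : (pvScanAbs p n).2 with _ | a <;> cases hpn : p (n : Int)
    · -- st = none, p n = false : unchanged
      have hstep : pvScanAbs p (n+1) = pvScanAbs p n := by
        rw [pv_scanAbs_succ]; simp [pvStepAbs, hst, hpn]
      have hfin' : pvFinAbs p (n+1) = pvFinAbs p n := by
        unfold pvFinAbs; rw [hstep, hst]
      refine ⟨?_, ?_, ?_, ?_, ?_, ?_⟩
      · intro q hq; rw [hfin'] at hq; have := A1 q hq
        exact ⟨this.1, this.2.1, by rw [hc]; omega⟩
      · intro q hq; rw [hstep] at hq; have := A2 q hq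
        exact ⟨by rw [hc]; omega, this.2⟩
      · rw [hfin']; exact A3
      · rw [hstep, hst]; right; rw [hc]; simpa using hpn
      · intro a'; rw [hfin', A5 a', hc]
        constructor
        · rintro ⟨h1', h2', h3'⟩; exact ⟨h1', h2', by omega⟩
        · rintro ⟨h1', h2', h3'⟩
          refine ⟨h1', h2', ?_⟩
          rcases (by omega : a' < (n:Int) ∨ a' = (n:Int)) with hx | hx
          · exact hx
          · rw [hx, hpn] at h1'; exact absurd h1' (by simp)
      · intro b; rw [hfin', A6 b, hc]
        constructor
        · rintro ⟨h1', h2', h3'⟩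
          refine ⟨h1', ?_, by omega⟩
          rcases h2' with h2' | h2'
          · exact Or.inl h2'
          · rw [h2']; exact Or.inl hpn
        · rintro ⟨h1', h2', h3'⟩
          have hbne : b ≠ (n:Int) + 1 := by
            intro hx
            rw [show b - 1 = (n:Int) from by omega, hpn] at h1'
            exact absurd h1' (by simp)
          rcases h2' with h2' | h2'
          · exact ⟨h1', Or.inl h2', by omega⟩
          · exact absurd h2' hbne
    · -- st = none, p n = true : open a new run
      have hstep : pvScanAbs p (n+1) = ((pvScanAbs p n).1, some (n:Int)) := by
        rw [pv_scanAbs_succ]; simp [pvStepAbs, hst, hpn]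
      have hfin : pvFinAbs p n = (pvScanAbs p n).1 := by unfold pvFinAbs; rw [hst]; simp
      have hfin' : pvFinAbs p (n+1) = (pvScanAbs p n).1 ++ [((n:Int), (n:Int)+1)] := by
        unfold pvFinAbs; rw [hstep, hc]
      rw [hfin] at A1 A3 A5 A6
      have hn1 : p ((n:Int) - 1) = false := by
        rw [hst] at A4
        rcases A4 with h0 | h0
        · subst h0; exact hneg _ (by norm_num)
        · exact h0
      refine ⟨?_, ?_, ?_, ?_, ?_, ?_⟩
      · intro q hq; rw [hfin', List.mem_append] at hq
        rcases hq with hq | hq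
        · have := A1 q hq; exact ⟨this.1, this.2.1, by rw [hc]; omega⟩
        · simp at hq; rw [hq]; refine ⟨by positivity, by omega, by rw [hc]⟩
      · intro q hq; rw [hstep] at hq; have := A2 q hq
        exact ⟨by rw [hc]; omega, this.2⟩
      · rw [hfin']; rw [List.pairwise_append]
        refine ⟨A3, List.pairwise_singleton _ _, ?_⟩
        intro q hq q' hq'; simp at hq'; rw [hq']
        exact (A2 q hq).1
      · rw [hstep]; rw [hc]
        exact ⟨by simpa using hpn, hpn, hn1, by positivity, by omega⟩
      · intro a'; rw [hfin', hc]
        rw [List.map_append, List.mem_append]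
        simp only [List.map_cons, List.map_nil, List.mem_singleton]
        rw [A5 a']
        constructor
        · rintro (⟨h1', h2', h3'⟩ | h1')
          · exact ⟨h1', h2', by omega⟩
          · rw [h1']; exact ⟨hpn, hn1, by omega⟩
        · rintro ⟨h1', h2', h3'⟩
          rcases (by omega : a' < (n:Int) ∨ a' = (n:Int)) with hx | hx
          · exact Or.inl ⟨h1', h2', hx⟩
          · exact Or.inr hx
      · intro b; rw [hfin', hc]
        rw [List.map_append, List.mem_append]
        simp only [List.map_cons, List.map_nil, List.mem_singleton]
        rw [A6 b]
        constructor
        · rintro (⟨h1', h2', h3'⟩ | h1')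
          · refine ⟨h1', ?_, by omega⟩
            rcases h2' with h2' | h2'
            · exact Or.inl h2'
            · -- b = n and b is the end of a completed run: p b = false by A2
              rw [h2'] at h1'
              rw [hn1] at h1'; exact absurd h1' (by simp)
          · rw [h1']; refine ⟨by simpa using hpn, Or.inr rfl, by omega⟩
        · rintro ⟨h1', h2', h3'⟩
          rcases (by omega : b = (n:Int)+1 ∨ b ≤ (n:Int)) with hx | hx
          · exact Or.inr hx
          · left
            refine ⟨h1', ?_, hx⟩
            rcases h2' with h2' | h2'
            · exact Or.inl h2'
            · omega
    · -- st = some a, p n = false : close the run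
      have hstep : pvScanAbs p (n+1) = ((pvScanAbs p n).1 ++ [(a, (n:Int))], none) := by
        rw [pv_scanAbs_succ]; simp [pvStepAbs, hst, hpn]
      have hfin : pvFinAbs p n = (pvScanAbs p n).1 ++ [(a, (n:Int))] := by
        unfold pvFinAbs; rw [hst]
      have hfin' : pvFinAbs p (n+1) = (pvScanAbs p n).1 ++ [(a, (n:Int))] := by
        unfold pvFinAbs; rw [hstep]; simp
      rw [hst] at A4
      obtain ⟨hA4a, hA4b, hA4c, hA4d, hA4e⟩ := A4
      refine ⟨?_, ?_, ?_, ?_, ?_, ?_⟩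
      · intro q hq; rw [hfin'] at hq; rw [hfin] at A1
        have := A1 q hq; exact ⟨this.1, this.2.1, by rw [hc]; omega⟩
      · intro q hq; rw [hstep] at hq; simp only [List.mem_append, List.mem_singleton] at hq
        rcases hq with hq | hq
        · have := A2 q hq; exact ⟨by rw [hc]; omega, this.2⟩
        · rw [hq]; exact ⟨by rw [hc]; omega, hpn⟩
      · rw [hfin']; rw [hfin] at A3; exact A3
      · rw [hstep]; right; rw [hc]; simpa using hpn
      · intro a'; rw [hfin']; rw [hfin] at A5; rw [A5 a', hc]
        constructor
        · rintro ⟨h1', h2', h3'⟩; exact ⟨h1', h2', by omega⟩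
        · rintro ⟨h1', h2', h3'⟩
          refine ⟨h1', h2', ?_⟩
          rcases (by omega : a' < (n:Int) ∨ a' = (n:Int)) with hx | hx
          · exact hx
          · rw [hx, hpn] at h1'; exact absurd h1' (by simp)
      · intro b; rw [hfin']; rw [hfin] at A6; rw [A6 b, hc]
        constructor
        · rintro ⟨h1', h2', h3'⟩
          refine ⟨h1', ?_, by omega⟩
          rcases h2' with h2' | h2'
          · exact Or.inl h2'
          · rw [h2']; exact Or.inl hpn
        · rintro ⟨h1', h2', h3'⟩
          have hbne : b ≠ (n:Int) + 1 := by
            intro hx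
            rw [show b - 1 = (n:Int) from by omega, hpn] at h1'
            exact absurd h1' (by simp)
          rcases h2' with h2' | h2'
          · exact ⟨h1', Or.inl h2', by omega⟩
          · exact absurd h2' hbne
    · -- st = some a, p n = true : run continues
      have hstep : pvScanAbs p (n+1) = pvScanAbs p n := by
        rw [pv_scanAbs_succ]; simp [pvStepAbs, hst, hpn]
      have hfin : pvFinAbs p n = (pvScanAbs p n).1 ++ [(a, (n:Int))] := by
        unfold pvFinAbs; rw [hst]
      have hfin' : pvFinAbs p (n+1) = (pvScanAbs p n).1 ++ [(a, (n:Int)+1)] := by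
        unfold pvFinAbs; rw [hstep, hst, hc]
      rw [hst] at A4
      obtain ⟨hA4a, hA4b, hA4c, hA4d, hA4e⟩ := A4
      have hcross : ∀ q ∈ (pvScanAbs p n).1, q.2 < a := by
        intro q hq
        rw [hfin, List.pairwise_append] at A3
        have := A3.2.2 q hq (a, (n:Int)) (by simp)
        exact this
      refine ⟨?_, ?_, ?_, ?_, ?_, ?_⟩
      · intro q hq; rw [hfin', List.mem_append] at hq
        rcases hq with hq | hq
        · have := A1 q (by rw [hfin, List.mem_append]; exact Or.inl hq)
          exact ⟨this.1, this.2.1, by rw [hc]; omega⟩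
        · simp at hq; rw [hq]; exact ⟨hA4d, by omega, by rw [hc]⟩
      · intro q hq; rw [hstep] at hq; have := A2 q hq
        exact ⟨by rw [hc]; omega, this.2⟩
      · rw [hfin', List.pairwise_append]
        rw [hfin, List.pairwise_append] at A3
        refine ⟨A3.1, List.pairwise_singleton _ _, ?_⟩
        intro q hq q' hq'; simp at hq'; rw [hq']
        exact hcross q hq
      · rw [hstep, hst]
        exact ⟨by rw [hc]; simpa using hpn, hA4b, hA4c, hA4d, by rw [hc]; omega⟩
      · intro a'; rw [hfin', hc]
        rw [List.map_append, List.mem_append]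
        simp only [List.map_cons, List.map_nil, List.mem_singleton]
        have hA5' := A5 a'
        rw [hfin, List.map_append, List.mem_append] at hA5'
        simp only [List.map_cons, List.map_nil, List.mem_singleton] at hA5'
        rw [hA5']
        constructor
        · rintro ⟨h1', h2', h3'⟩; exact ⟨h1', h2', by omega⟩
        · rintro ⟨h1', h2', h3'⟩
          refine ⟨h1', h2', ?_⟩
          rcases (by omega : a' < (n:Int) ∨ a' = (n:Int)) with hx | hx
          · exact hx
          · exfalso; rw [hx, hA4a] at h2'
            exact absurd h2' (by simp)
      · intro b; rw [hfin', hc]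
        rw [List.map_append, List.mem_append]
        simp only [List.map_cons, List.map_nil, List.mem_singleton]
        have hA6' := A6 b
        rw [hfin, List.map_append, List.mem_append] at hA6'
        simp only [List.map_cons, List.map_nil, List.mem_singleton] at hA6'
        constructor
        · rintro (hb | hb)
          · have hchar := hA6'.mp (Or.inl hb)
            obtain ⟨q, hq, hq2⟩ := List.mem_map.mp hb
            have hpb : p b = false := hq2 ▸ (A2 q hq).2
            exact ⟨hchar.1, Or.inl hpb, by have := hchar.2.2; omega⟩
          · rw [hb]; exact ⟨by simpa using hpn, Or.inr rfl, by omega⟩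
        · rintro ⟨h1', h2', h3'⟩
          rcases (by omega : b = (n:Int)+1 ∨ b ≤ (n:Int)) with hx | hx
          · exact Or.inr hx
          · left
            have hbn : b ≠ (n:Int) := by
              intro hy
              rcases h2' with h2' | h2'
              · rw [hy, hpn] at h2'; exact absurd h2' (by simp)
              · omega
            have := hA6'.mpr ⟨h1', (by
              rcases h2' with h2' | h2'
              · exact Or.inl h2'
              · omega), hx⟩
            rcases this with hb | hb
            · exact hb
            · exact absurd hb hbn

lemma pv_day_eq (l : List Bool) (t : PySem.Set Int) (hnd : t.Nodup)
    (hb : ∀ h ∈ t, 0 ≤ h ∧ h < 24) (_hlen : l.length = 24)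
    (hpt : ∀ h : Int, 0 ≤ h → h < 24 → PySem.List.pyGetD l h false = PySem.Set.contains t h) :
    pvRangesA l = pvRangesB t := by
  have hmem : ∀ h : Int, PySem.Set.contains t h = true ↔ h ∈ t :=
    fun h => PySem.Set.contains_iff t h
  have hneg : ∀ h : Int, h < 0 → PySem.Set.contains t h = false := by
    intro h hh; rw [← Bool.not_eq_true]; intro hcon
    have := (hb h ((hmem h).mp hcon)).1; omega
  have hsup : ∀ h : Int, PySem.Set.contains t h = true → 0 ≤ h ∧ h < 24 :=
    fun h hcon => hb h ((hmem h).mp hcon)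
  have h24 : (24 : Int) = ((24:Nat) : Int) := by norm_num
  unfold pvRangesA
  have hstep : ∀ (acc : List (List (String × String)) × Option Int), ∀ x ∈ PySem.List.pyRange 0 24,
      (fun (st : List (List (String × String)) × Option Int) hour =>
        if PySem.List.pyGetD l hour false && st.2.isNone then (st.1, some hour)
        else if !(PySem.List.pyGetD l hour false) && st.2.isSome then
          (st.1 ++ [[("open", pvFmt2 (st.2.getD 0)), ("close", pvFmt2 hour)]], none)
        else st) acc x
      = (fun (st : List (List (String × String)) × Option Int) hour =>
        if PySem.Set.contains t hour && st.2.isNone then (st.1, some hour)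
        else if !(PySem.Set.contains t hour) && st.2.isSome then
          (st.1 ++ [[("open", pvFmt2 (st.2.getD 0)), ("close", pvFmt2 hour)]], none)
        else st) acc x := by
    intro acc x hx
    have hxr := PySem.List.mem_pyRange_one.mp hx
    simp only [hpt x hxr.1 hxr.2]
  rw [PySem.List.foldl_congr_mem _ _ _ _ hstep, h24,
      pv_scanA_eq (fun h => PySem.Set.contains t h) 24]
  obtain ⟨A1, A2, A3, A4, A5, A6⟩ := pv_inv (fun h => PySem.Set.contains t h) hneg 24
  rw [← h24] at A1 A2 A4 A5 A6
  -- both sides equal (pvFinAbs p 24).map pvFmtPairB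
  have hAB : ∀ q ∈ (pvScanAbs (fun h => PySem.Set.contains t h) 24).1,
      pvFmtPairB q = pvFmtPair q := by
    intro q hq
    have := (A2 q hq).1
    unfold pvFmtPairB pvFmtPair
    rw [if_neg (by omega)]
  have hA : (match (pvScanAbs (fun h => PySem.Set.contains t h) 24).2 with
      | some a => ((pvScanAbs (fun h => PySem.Set.contains t h) 24).1.map pvFmtPair)
          ++ [[("open", pvFmt2 a), ("close", "23:59")]]
      | none => (pvScanAbs (fun h => PySem.Set.contains t h) 24).1.map pvFmtPair)
      = (pvFinAbs (fun h => PySem.Set.contains t h) 24).map pvFmtPairB := by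
    unfold pvFinAbs
    rcases hST : (pvScanAbs (fun h => PySem.Set.contains t h) 24).2 with _ | a
    · simp only [List.append_nil]
      exact (List.map_congr_left hAB).symm
    · rw [List.map_append, List.map_congr_left hAB]
      rfl
  -- Pairwise facts
  have hq12 : ∀ q ∈ pvFinAbs (fun h => PySem.Set.contains t h) 24, q.1 < q.2 :=
    fun q hq => (A1 q hq).2.1
  have hpwfst : List.Pairwise (· < ·)
      ((pvFinAbs (fun h => PySem.Set.contains t h) 24).map Prod.fst) := by
    rw [List.pairwise_map]
    exact A3.imp_of_mem (fun ha hb' hr => by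
      have := hq12 _ ha; omega)
  have hpwsnd : List.Pairwise (· < ·)
      ((pvFinAbs (fun h => PySem.Set.contains t h) 24).map Prod.snd) := by
    rw [List.pairwise_map]
    exact A3.imp_of_mem (fun ha hb' hr => by
      have := hq12 _ hb'; omega)
  have hstarts : PySem.List.sorted (t.filter (fun h => !(PySem.Set.contains t (h - 1)))) (fun x => x)
      = (pvFinAbs (fun h => PySem.Set.contains t h) 24).map Prod.fst := by
    apply PySem.List.sorted_eq_of_perm_of_pairwise_lt
    · rw [List.perm_ext_iff_of_nodup (hpwfst.imp (fun hr => ne_of_lt hr)) (hnd.filter _)]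
      intro x
      rw [A5 x, List.mem_filter]
      constructor
      · rintro ⟨h1', h2', _⟩
        exact ⟨(hmem x).mp h1', by rw [Bool.not_eq_eq_eq_not, Bool.not_true]; exact h2'⟩
      · rintro ⟨h1', h2'⟩
        refine ⟨(hmem x).mpr h1', by rwa [Bool.not_eq_eq_eq_not, Bool.not_true] at h2', ?_⟩
        exact (hb x h1').2
    · exact hpwfst
  have hends : PySem.List.sorted ((t.filter (fun h => !(PySem.Set.contains t (h + 1)))).map (fun h => h + 1)) (fun x => x)
      = (pvFinAbs (fun h => PySem.Set.contains t h) 24).map Prod.snd := by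
    apply PySem.List.sorted_eq_of_perm_of_pairwise_lt
    · rw [List.perm_ext_iff_of_nodup (hpwsnd.imp (fun hr => ne_of_lt hr))
        ((hnd.filter _).map (fun a b hab => by omega))]
      intro b
      rw [A6 b]
      constructor
      · rintro ⟨h1', h2', h3'⟩
        rw [List.mem_map]
        refine ⟨b - 1, ?_, by ring⟩
        rw [List.mem_filter]
        refine ⟨(hmem _).mp h1', ?_⟩
        rw [Bool.not_eq_eq_eq_not, Bool.not_true, show b - 1 + 1 = b from by ring]
        rcases h2' with h2' | h2'
        · exact h2'
        · rw [← Bool.not_eq_true]; intro hcon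
          have := (hsup b hcon).2; omega
      · intro hbm
        rw [List.mem_map] at hbm
        obtain ⟨a, ha, hab⟩ := hbm
        rw [List.mem_filter, Bool.not_eq_eq_eq_not, Bool.not_true] at ha
        have hbnd := hb a ha.1
        refine ⟨by rw [show b - 1 = a from by omega]; exact (hmem a).mpr ha.1,
          Or.inl (by rw [show b = a + 1 from by omega]; exact ha.2), by omega⟩
    · exact hpwsnd
  rw [hA]
  unfold pvRangesB
  rw [hstarts, hends]
  show List.map pvFmtPairB (pvFinAbs (fun h => PySem.Set.contains t h) 24)
      = List.map (fun q => [("open", pvFmt2 q.1), ("close", if q.2 = 24 then "23:59" else pvFmt2 q.2)])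
        ((List.map Prod.fst (pvFinAbs (fun h => PySem.Set.contains t h) 24)).zip
         (List.map Prod.snd (pvFinAbs (fun h => PySem.Set.contains t h) 24)))
  rw [List.zip_map', List.map_map]
  rfl

lemma pv_insert_items_ne_nil {κ ν : Type} [BEq κ] (d : PySem.Dict κ ν) (k : κ) (v : ν) :
    (d.insert k v).items ≠ [] := by
  unfold PySem.Dict.insert
  split_ifs with hcc
  · intro hcon2
    simp only [List.map_eq_nil_iff] at hcon2
    rw [PySem.Dict.contains, hcon2] at hcc
    simp at hcc
  · simp

lemma pv_foldl_insert_ne_nil (rest : List (List Char × String))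
    (f : List Char × String → List (List (String × String)))
    (d : PySem.Dict String (List (List (String × String)))) (hd : d.items ≠ []) :
    (rest.foldl (fun r dp => r.insert dp.2 (f dp)) d).items ≠ [] := by
  induction rest generalizing d with
  | nil => exact hd
  | cons e rest ih => exact ih _ (pv_insert_items_ne_nil d e.2 (f e))

lemma pv_items_ne_nil (f : List Char × String → List (List (String × String))) :
    (pvDays.foldl (fun r dp => r.insert dp.2 (f dp)) PySem.Dict.empty).items ≠ [] := by
  rw [show pvDays = (['M','o'], "monday") ::
    [(['T','u'], "tuesday"), (['W','e'], "wednesday"), (['T','h'], "thursday"),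
     (['F','r'], "friday"), (['S','a'], "saturday"), (['S','u'], "sunday")] from rfl,
    List.foldl_cons]
  exact pv_foldl_insert_ne_nil _ f _ (pv_insert_items_ne_nil _ _ _)

-- ===== VERDICT (by name: the statement is the Claim_ definition above) =====
theorem parse_hourly_to_ranges_spec : Claim_equal_parse_hourly_to_ranges := by
  intro hs _
  unfold Spec_parse_hourly_to_ranges parse_hourly_to_ranges parse_hourly_to_ranges_alt
  cases hs with
  | none => rfl
  | some s =>
    dsimp only
    by_cases hg : s = "" ∨ s = "NULL"
    · rw [if_pos hg, if_pos hg]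
    · rw [if_neg hg, if_neg hg]
      obtain ⟨h1, h2, h3, h4, h5, h6⟩ :=
        pvRelD_fold (PySem.Chars.splitOn s.toList [';']) _ _ pvRelD_init
      have hday : ∀ (acc : PySem.Dict String (List (List (String × String)))),
          ∀ dp ∈ pvDays,
          (fun r (dp : List Char × String) => r.insert dp.2
            (pvRangesA (((PySem.Chars.splitOn s.toList [';']).foldl pvStepA pvInitA).getD dp.1 []))) acc dp
          = (fun r (dp : List Char × String) => r.insert dp.2
            (pvRangesB (((PySem.Chars.splitOn s.toList [';']).foldl pvStepB pvInitB).getD dp.1 []))) acc dp := by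
        intro acc dp hdp
        have := pv_day_eq _ _ (h3 dp.1) (h4 dp.1) (h5 dp.1 (h2 dp hdp)) (h6 dp.1)
        simp only [this]
      rw [PySem.List.foldl_congr_mem _ _ _ _ hday,
        if_neg (pv_items_ne_nil (fun dp =>
          pvRangesB (((PySem.Chars.splitOn s.toList [';']).foldl pvStepB pvInitB).getD dp.1 [])))]
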